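-- pv_equiv track=rewrite | github.com/cropsetu/cropsetu-frontend | AI_CROP_DISESE_DETECTION/services/input_normalizer.py | estimate_growth_stage
-- ===== SOURCE A (Python) =====
-- _STAGE_OVERRIDES: dict[str, list[tuple[int, str]]] = {
--     # (age_cutoffs, stage_name) — sorted ascending
--     "Sugarcane": [(30, "Germination"), (120, "Tillering"), (270, "Grand Growth"), (360, "Maturity")],
--     "Rice":      [(20, "Seedling"),    (60,  "Tillering"), (90,  "Heading"),       (130, "Maturity")],
--     "Wheat":     [(20, "Seedling"),    (50,  "Tillering"), (90,  "Flowering"),     (120, "Maturity")],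
-- }
--
-- _DEFAULT_STAGES = [(20, "Seedling"), (60, "Vegetative"), (90, "Flowering"), (130, "Fruiting"), (9999, "Maturity")]
--
-- def estimate_growth_stage(crop: str, age_days) -> str:
--     """Derive growth stage from crop type and age in days."""
--     if age_days is None:
--         return "Vegetative"
--     try:
--         age = int(float(age_days))
--     except (ValueError, TypeError):
--         return "Vegetative"
--
--     stages = _STAGE_OVERRIDES.get(crop, _DEFAULT_STAGES)
--     for cutoff, label in stages:
--         if age <= cutoff:
--             return label
--     return "Maturity"
-- ===== SOURCE B (Python) =====
-- import bisect
--
-- # Each table: (ascending cutoffs, parallel stage labels)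
-- _TABLES: dict[str, tuple[list[int], list[str]]] = {
--     "Sugarcane": ([30, 120, 270, 360], ["Germination", "Tillering", "Grand Growth", "Maturity"]),
--     "Rice":      ([20, 60, 90, 130],   ["Seedling", "Tillering", "Heading", "Maturity"]),
--     "Wheat":     ([20, 50, 90, 120],   ["Seedling", "Tillering", "Flowering", "Maturity"]),
-- }
--
-- _DEFAULT_TABLE = ([20, 60, 90, 130, 9999], ["Seedling", "Vegetative", "Flowering", "Fruiting", "Maturity"])
--
-- def estimate_growth_stage(crop: str, age_days) -> str:
--     """Derive growth stage from crop type and age in days."""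
--     if age_days is None:
--         return "Vegetative"
--     try:
--         age = int(float(age_days))
--     except (ValueError, TypeError):
--         return "Vegetative"
--
--     cutoffs, labels = _TABLES.get(crop, _DEFAULT_TABLE)
--     i = bisect.bisect_left(cutoffs, age)
--     return labels[i] if i < len(labels) else "Maturity"
-- ===== Notes on version B (the rewrite author's own statement) =====
-- stated objective: idiomatic
-- what changed: Replaces the sequential cutoff scan over (cutoff, label) tuples with parallel ascending cutoff/label lists and a bisect_left binary-search index lookup.
import Mathlib
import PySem

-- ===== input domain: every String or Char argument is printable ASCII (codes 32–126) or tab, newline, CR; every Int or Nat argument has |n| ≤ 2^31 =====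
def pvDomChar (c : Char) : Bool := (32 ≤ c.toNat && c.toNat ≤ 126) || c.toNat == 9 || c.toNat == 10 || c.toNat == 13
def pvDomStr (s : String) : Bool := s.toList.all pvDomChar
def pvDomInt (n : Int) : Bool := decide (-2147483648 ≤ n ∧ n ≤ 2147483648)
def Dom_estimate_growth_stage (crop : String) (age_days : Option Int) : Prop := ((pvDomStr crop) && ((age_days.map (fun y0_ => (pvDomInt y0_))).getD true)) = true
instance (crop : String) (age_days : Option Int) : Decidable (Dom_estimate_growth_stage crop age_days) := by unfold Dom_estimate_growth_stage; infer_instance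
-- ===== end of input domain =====

-- B replaces A's sequential scan of (cutoff, label) tuples with parallel
-- cutoff/label lists and a bisect_left binary-search index lookup (idiomatic).
-- Note: the Python try/except int(float(age_days)) never fires for an Int
-- argument (our declared type), so both ports take age directly.

-- ===== PORT A =====
def aStageOverrides : PySem.Dict String (List (Int × String)) :=
  PySem.Dict.ofList
    [ ("Sugarcane", [(30, "Germination"), (120, "Tillering"), (270, "Grand Growth"), (360, "Maturity")])
    , ("Rice",      [(20, "Seedling"),    (60,  "Tillering"), (90,  "Heading"),      (130, "Maturity")])
    , ("Wheat",     [(20, "Seedling"),    (50,  "Tillering"), (90,  "Flowering"),    (120, "Maturity")]) ]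

def aDefaultStages : List (Int × String) :=
  [(20, "Seedling"), (60, "Vegetative"), (90, "Flowering"), (130, "Fruiting"), (9999, "Maturity")]

-- the 'for cutoff, label in stages: if age <= cutoff: return label' loop
def aScan : List (Int × String) → Int → String
  | [], _ => "Maturity"
  | (cutoff, label) :: rest, age => if age ≤ cutoff then label else aScan rest age

def estimate_growth_stage (crop : String) (age_days : Option Int) : String :=
  match age_days with
  | none => "Vegetative"
  | some age => aScan ((aStageOverrides.get? crop).getD aDefaultStages) age

-- ===== PORT B =====
def bTables : PySem.Dict String (List Int × List String) :=
  PySem.Dict.ofList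
    [ ("Sugarcane", ([30, 120, 270, 360], ["Germination", "Tillering", "Grand Growth", "Maturity"]))
    , ("Rice",      ([20, 60, 90, 130],   ["Seedling", "Tillering", "Heading", "Maturity"]))
    , ("Wheat",     ([20, 50, 90, 120],   ["Seedling", "Tillering", "Flowering", "Maturity"])) ]

def bDefaultTable : List Int × List String :=
  ([20, 60, 90, 130, 9999], ["Seedling", "Vegetative", "Flowering", "Fruiting", "Maturity"])

def estimate_growth_stage_alt (crop : String) (age_days : Option Int) : String :=
  match age_days with
  | none => "Vegetative"
  | some age =>
    let t := (bTables.get? crop).getD bDefaultTable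
    let i := PySem.List.bisectLeft t.1 age
    if i < t.2.length then t.2.getD i "Maturity" else "Maturity"

-- ===== PRECONDITION & SPEC =====
def Spec_estimate_growth_stage (crop : String) (age_days : Option Int) (out : String) : Prop := out = estimate_growth_stage_alt crop age_days
instance (crop : String) (age_days : Option Int) (out : String) : Decidable (Spec_estimate_growth_stage crop age_days out) := by unfold Spec_estimate_growth_stage; infer_instance

-- ===== CLAIM (what is proved, stated in full; the proofs are below) =====
def Claim_equal_estimate_growth_stage : Prop := ∀ (crop : String) (age_days : Option Int), Dom_estimate_growth_stage crop age_days → Spec_estimate_growth_stage crop age_days (estimate_growth_stage crop age_days)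

-- ===== LEMMAS AND PROOFS =====

-- per-table agreement of the scan and the bisect lookup, for each concrete table
theorem table_sugarcane (age : Int) :
    aScan [(30, "Germination"), (120, "Tillering"), (270, "Grand Growth"), (360, "Maturity")] age =
    (let i := PySem.List.bisectLeft [(30:Int),120,270,360] age
     if i < (["Germination", "Tillering", "Grand Growth", "Maturity"] : List String).length
     then (["Germination", "Tillering", "Grand Growth", "Maturity"] : List String).getD i "Maturity" else "Maturity") := by
  simp only [PySem.List.bisectLeft, aScan]
  norm_num [PySem.List.bisectLeftLoop]
  split_ifs <;> simp_all <;> omega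

theorem table_rice (age : Int) :
    aScan [(20, "Seedling"), (60, "Tillering"), (90, "Heading"), (130, "Maturity")] age =
    (let i := PySem.List.bisectLeft [(20:Int),60,90,130] age
     if i < (["Seedling", "Tillering", "Heading", "Maturity"] : List String).length
     then (["Seedling", "Tillering", "Heading", "Maturity"] : List String).getD i "Maturity" else "Maturity") := by
  simp only [PySem.List.bisectLeft, aScan]
  norm_num [PySem.List.bisectLeftLoop]
  split_ifs <;> simp_all <;> omega

theorem table_wheat (age : Int) :
    aScan [(20, "Seedling"), (50, "Tillering"), (90, "Flowering"), (120, "Maturity")] age =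
    (let i := PySem.List.bisectLeft [(20:Int),50,90,120] age
     if i < (["Seedling", "Tillering", "Flowering", "Maturity"] : List String).length
     then (["Seedling", "Tillering", "Flowering", "Maturity"] : List String).getD i "Maturity" else "Maturity") := by
  simp only [PySem.List.bisectLeft, aScan]
  norm_num [PySem.List.bisectLeftLoop]
  split_ifs <;> simp_all <;> omega

theorem table_default (age : Int) :
    aScan aDefaultStages age =
    (let i := PySem.List.bisectLeft bDefaultTable.1 age
     if i < bDefaultTable.2.length then bDefaultTable.2.getD i "Maturity" else "Maturity") := by
  simp only [aDefaultStages, bDefaultTable, PySem.List.bisectLeft, aScan]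
  norm_num [PySem.List.bisectLeftLoop]
  split_ifs <;> simp_all <;> omega

-- ===== VERDICT (by name: the statement is the Claim_ definition above) =====
theorem estimate_growth_stage_spec : Claim_equal_estimate_growth_stage := by
  intro crop age_days _
  unfold Spec_estimate_growth_stage estimate_growth_stage estimate_growth_stage_alt
  cases age_days with
  | none => rfl
  | some age =>
    by_cases h1 : crop = "Sugarcane"
    · subst h1; simpa [aStageOverrides, bTables, PySem.Dict.ofList] using table_sugarcane age
    by_cases h2 : crop = "Rice"
    · subst h2; simpa [aStageOverrides, bTables, PySem.Dict.ofList] using table_rice age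
    by_cases h3 : crop = "Wheat"
    · subst h3; simpa [aStageOverrides, bTables, PySem.Dict.ofList] using table_wheat age
    · have hg1 : aStageOverrides.get? crop = none := by
        simp [aStageOverrides, PySem.Dict.ofList, PySem.Dict.update, PySem.Dict.get?_insert,
          PySem.Dict.get?_empty, h1, h2, h3]
      have hg2 : bTables.get? crop = none := by
        simp [bTables, PySem.Dict.ofList, PySem.Dict.update, PySem.Dict.get?_insert,
          PySem.Dict.get?_empty, h1, h2, h3]
      simp only [hg1, hg2, Option.getD_none]
      exact table_default age
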